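-- pv_equiv track=rewrite | github.com/bernardsmith0892/AdventOfCode | 2019/day17.py | compile_path
-- ===== SOURCE A (Python) =====
-- def compile_path(path):
-- 	clean_path = ""
-- 	forward_count = 0
-- 	for c in path:
-- 		if c != 'F':
-- 			if forward_count > 0:
-- 				clean_path += f"{forward_count},"
-- 				forward_count = 0
-- 			clean_path += f"{c},"
-- 		if c == 'F':
-- 			forward_count += 1
--
-- 	if forward_count > 0:
-- 				clean_path += f"{forward_count},"
--
-- 	return clean_path[:-1]
-- ===== SOURCE B (Python) =====
-- def compile_path(path):
--     # Tokenize first: split into maximal runs of 'F' (emitted as their length)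
--     # and individual non-'F' characters, then join with commas.
--     tokens = []
--     i = 0
--     n = len(path)
--     while i < n:
--         if path[i] == 'F':
--             j = i
--             while j < n and path[j] == 'F':
--                 j += 1
--             tokens.append(str(j - i))
--             i = j
--         else:
--             tokens.append(path[i])
--             i += 1
--     return ",".join(tokens)
-- ===== Notes on version B (the rewrite author's own statement) =====
-- stated objective: idiomatic
-- what changed: Replaced the flush-on-non-F state machine (string accumulator with trailing-comma strip) by tokenize-then-join: scan maximal F-runs with an index loop, collect tokens in a list, and comma-join them, so no counter flushing and no final-character strip.
import Mathlib
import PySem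

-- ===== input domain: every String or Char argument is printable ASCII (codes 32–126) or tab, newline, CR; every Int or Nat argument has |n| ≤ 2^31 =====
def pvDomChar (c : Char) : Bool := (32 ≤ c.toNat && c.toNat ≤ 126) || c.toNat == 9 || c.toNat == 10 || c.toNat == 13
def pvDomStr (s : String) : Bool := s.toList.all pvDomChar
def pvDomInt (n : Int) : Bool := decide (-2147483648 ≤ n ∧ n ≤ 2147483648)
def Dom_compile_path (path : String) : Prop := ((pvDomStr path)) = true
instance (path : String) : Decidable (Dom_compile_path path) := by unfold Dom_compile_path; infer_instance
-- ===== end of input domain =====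

-- B tokenizes the path into maximal F-runs / single non-F chars and comma-joins them
-- instead of A's flush-on-non-F state machine with a trailing-comma strip (idiomatic).

-- ===== PORT A =====
-- loop body of A: flush the forward counter on a non-'F' char, append the char, count 'F's
def pvStepA (st : List Char × Int) (c : Char) : List Char × Int :=
  let st :=
    if c ≠ 'F' then
      let st := if st.2 > 0 then (st.1 ++ PySem.Int.toChars st.2 ++ [','], 0) else st
      (st.1 ++ [c, ','], st.2)
    else st
  if c = 'F' then (st.1, st.2 + 1) else st

def compile_path (path : String) : String :=
  let st := path.toList.foldl pvStepA ([], 0)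
  let cp := if st.2 > 0 then st.1 ++ PySem.Int.toChars st.2 ++ [','] else st.1
  String.ofList (PySem.List.slice cp none (some (-1)))   -- clean_path[:-1]

-- ===== PORT B =====
-- Source B's index loop: a maximal 'F'-run becomes str(run length), any other char is its own token
def pvTokens : List Char → List (List Char)
  | [] => []
  | c :: rest =>
    if c = 'F' then
      PySem.Int.toChars ((1 + (rest.takeWhile (· == 'F')).length : Nat) : Int)
        :: pvTokens (rest.dropWhile (· == 'F'))
    else [c] :: pvTokens rest
termination_by l => l.length
decreasing_by
  · simp only [List.length_cons]
    exact Nat.lt_succ_of_le (List.length_dropWhile_le (· == 'F') rest)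
  · simp

def compile_path_alt (path : String) : String :=
  String.ofList (PySem.Chars.join [','] (pvTokens path.toList))   -- the comma-join of Source B

-- ===== PRECONDITION & SPEC =====
def Spec_compile_path (path : String) (out : String) : Prop := out = compile_path_alt path
instance (path : String) (out : String) : Decidable (Spec_compile_path path out) := by unfold Spec_compile_path; infer_instance

-- ===== CLAIM (what is proved, stated in full; the proofs are below) =====
def Claim_equal_compile_path : Prop := ∀ (path : String), Dom_compile_path path → Spec_compile_path path (compile_path path)

-- ===== LEMMAS AND PROOFS =====

-- A's output after the final flush, as a recursion over the remaining input and the counter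
def pvG : List Char → Int → List Char
  | [], fc => if fc > 0 then PySem.Int.toChars fc ++ [','] else []
  | c :: rest, fc =>
    if c = 'F' then pvG rest (fc + 1)
    else (if fc > 0 then PySem.Int.toChars fc ++ [','] else []) ++ [c, ','] ++
         pvG rest (if fc > 0 then 0 else fc)

-- B's tokenizer generalized by a pending count of already-seen 'F's
def pvTok' : Nat → List Char → List (List Char)
  | n, [] => if 0 < n then [PySem.Int.toChars (n : Int)] else []
  | n, c :: rest =>
    if c = 'F' then pvTok' (n + 1) rest
    else (if 0 < n then [PySem.Int.toChars (n : Int)] else []) ++ [c] :: pvTok' 0 rest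

def pvFlat (ts : List (List Char)) : List Char := ts.flatMap (fun t => t ++ [','])

theorem pvFoldA_eq_pvG (l : List Char) : ∀ (cp : List Char) (fc : Int),
    (let st := l.foldl pvStepA (cp, fc)
     if st.2 > 0 then st.1 ++ PySem.Int.toChars st.2 ++ [','] else st.1) = cp ++ pvG l fc := by
  induction l with
  | nil => intro cp fc; by_cases h : fc > 0 <;> simp [pvG, h]
  | cons c rest ih =>
    intro cp fc
    by_cases hc : c = 'F'
    · subst hc
      have hstep : pvStepA (cp, fc) 'F' = (cp, fc + 1) := by simp [pvStepA]
      rw [List.foldl_cons, hstep]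
      simpa [pvG] using ih cp (fc + 1)
    · by_cases hfc : fc > 0
      · simpa [pvStepA, pvG, hc, hfc] using ih (cp ++ PySem.Int.toChars fc ++ [','] ++ [c, ',']) 0
      · simpa [pvStepA, pvG, hc, hfc] using ih (cp ++ [c, ',']) fc

theorem pvG_eq_flat_pvTok' (l : List Char) : ∀ (n : Nat), pvG l (n : Int) = pvFlat (pvTok' n l) := by
  induction l with
  | nil =>
    intro n
    by_cases h : 0 < n <;> simp [pvG, pvTok', pvFlat, h, Int.natCast_pos]
  | cons c rest ih =>
    intro n
    by_cases hc : c = 'F'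
    · have := ih (n + 1)
      push_cast at this
      simp [pvG, pvTok', hc, this]
    · have i0 := ih 0
      push_cast at i0
      by_cases h : 0 < n
      · simp [pvG, pvTok', pvFlat, hc, h, Int.natCast_pos, i0]
      · obtain rfl : n = 0 := by omega
        simp [pvG, pvTok', pvFlat, hc, i0]

theorem pvTok'_succ (rest : List Char) : ∀ (n : Nat),
    pvTok' (n + 1) rest =
      PySem.Int.toChars (((n + 1 + (rest.takeWhile (· == 'F')).length : Nat)) : Int)
        :: pvTok' 0 (rest.dropWhile (· == 'F')) := by
  induction rest with
  | nil => intro n; simp [pvTok']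
  | cons c rest ih =>
    intro n
    by_cases hc : c = 'F'
    · subst hc
      have hrec : pvTok' (n + 1) ('F' :: rest) = pvTok' (n + 1 + 1) rest := by simp [pvTok']
      rw [hrec, ih (n + 1)]
      simp only [List.takeWhile_cons, List.dropWhile_cons, beq_self_eq_true, if_true,
        List.length_cons]
      congr 2
      omega
    · simp [pvTok', hc]

theorem pvTok'_zero_aux (k : Nat) : ∀ (l : List Char), l.length ≤ k → pvTok' 0 l = pvTokens l := by
  induction k with
  | zero =>
    intro l hl
    rw [List.eq_nil_of_length_eq_zero (Nat.le_zero.mp hl)]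
    simp [pvTok', pvTokens]
  | succ k ih =>
    intro l hl
    match l with
    | [] => simp [pvTok', pvTokens]
    | c :: rest =>
      by_cases hc : c = 'F'
      · subst hc
        have h1 : pvTok' 0 ('F' :: rest) = pvTok' (0 + 1) rest := by simp [pvTok']
        rw [h1, pvTok'_succ, pvTokens,
          ih (rest.dropWhile (· == 'F'))
            (le_trans (List.length_dropWhile_le (· == 'F') rest) (by simpa using hl))]
        simp
      · rw [pvTokens, if_neg hc]
        have := ih rest (by simpa using hl)
        simp [pvTok', hc, this]

theorem pvTok'_zero (l : List Char) : pvTok' 0 l = pvTokens l :=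
  pvTok'_zero_aux l.length l le_rfl

theorem pvFlat_ne_nil (t : List Char) (ts : List (List Char)) : pvFlat (t :: ts) ≠ [] := by
  simp [pvFlat]

theorem pvFlat_dropLast_eq_join (ts : List (List Char)) :
    (pvFlat ts).dropLast = PySem.Chars.join [','] ts := by
  induction ts with
  | nil => simp [pvFlat, PySem.Chars.join_nil]
  | cons a ts ih =>
    cases ts with
    | nil => simp [pvFlat, PySem.Chars.join_singleton]
    | cons b ts =>
      have h : pvFlat (a :: b :: ts) = (a ++ [',']) ++ pvFlat (b :: ts) := by
        simp [pvFlat]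
      rw [h, List.dropLast_append_of_ne_nil (pvFlat_ne_nil b ts), ih,
        PySem.Chars.join_cons_cons]

-- ===== VERDICT (by name: the statement is the Claim_ definition above) =====
theorem compile_path_spec : Claim_equal_compile_path := by
  intro path _
  show compile_path path = compile_path_alt path
  simp only [compile_path, compile_path_alt]
  rw [PySem.List.slice_to_neg_one]
  have h := pvFoldA_eq_pvG path.toList [] 0
  simp only [List.nil_append] at h
  rw [h, show (0 : Int) = ((0 : Nat) : Int) by simp, pvG_eq_flat_pvTok', pvTok'_zero,
    pvFlat_dropLast_eq_join]
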